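-- pv_equiv track=rewrite | github.com/buscagliad/adventofcode | 2024/day24/wires.py | bin2
-- ===== SOURCE A (Python) =====
-- def bin2(n):
--     b=""
--     i = 0
--     fb = -1
--     k = 0
--     while n > 0:
--         if n & 1:
--             if fb == -1: fb = k
--             b += '1'
--         else:
--             b += '0'
--         n //= 2
--         k += 1
--     return fb, b
-- ===== SOURCE B (Python) =====
-- def bin2(n):
--     if n <= 0:
--         return -1, ""
--     b = bin(n)[2:][::-1]
--     return (n & -n).bit_length() - 1, b
-- ===== Notes on version B (the rewrite author's own statement) =====
-- stated objective: idiomatic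
-- what changed: Replaces the explicit per-bit while-loop with accumulators by the library binary string bin(n)[2:] reversed, and computes the first set-bit position in closed form via the lowest-set-bit trick (n & -n).bit_length() - 1.
import Mathlib
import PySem

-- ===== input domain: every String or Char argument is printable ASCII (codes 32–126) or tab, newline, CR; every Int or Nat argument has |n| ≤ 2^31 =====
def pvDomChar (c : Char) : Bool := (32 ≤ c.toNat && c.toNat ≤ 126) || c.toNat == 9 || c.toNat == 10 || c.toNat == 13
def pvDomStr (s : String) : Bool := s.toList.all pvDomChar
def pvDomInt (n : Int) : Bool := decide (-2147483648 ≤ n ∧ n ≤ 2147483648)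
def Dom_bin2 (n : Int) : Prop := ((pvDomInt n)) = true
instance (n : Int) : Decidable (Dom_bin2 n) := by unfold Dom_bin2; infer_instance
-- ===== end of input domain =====

-- B replaces A's per-bit accumulator loop by the reversed library binary string and the
-- closed-form lowest-set-bit position (n & -n).bit_length() - 1 (idiomatic, no explicit loop).

-- ===== PORT A =====
-- the while-loop of A; the string is carried as List Char and packed by String.mk at the end
def bin2Loop (n : Int) (b : List Char) (fb k : Int) : Int × List Char :=
  if h : 0 < n then
    if PySem.Int.band n 1 ≠ 0 then
      bin2Loop (PySem.Int.floordiv n 2) (b ++ ['1']) (if fb = -1 then k else fb) (k + 1)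
    else
      bin2Loop (PySem.Int.floordiv n 2) (b ++ ['0']) fb (k + 1)
  else (fb, b)
termination_by n.toNat
decreasing_by
  all_goals
    rw [PySem.Int.floordiv_eq_ediv_of_pos (by omega)]
    omega

def bin2 (n : Int) : Int × String :=
  -- b="" ; i=0 (unused in A) ; fb=-1 ; k=0 ; while n > 0: …
  let r := bin2Loop n [] (-1) 0
  (r.1, String.mk r.2)

-- ===== PORT B =====
-- bin(m)[2:] for m : Nat, most-significant bit first (the library call ported by hand)
def binChars (m : Nat) : List Char :=
  if m = 0 then [] else binChars (m / 2) ++ [if m % 2 = 1 then '1' else '0']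

def bin2_alt (n : Int) : Int × String :=
  if n ≤ 0 then (-1, "")
  else (((PySem.Int.bitLength (PySem.Int.band n (-n)) : Int) - 1),
        String.mk ((binChars n.toNat).reverse))

-- ===== PRECONDITION & SPEC =====
def Spec_bin2 (n : Int) (out : Int × String) : Prop := out = bin2_alt n
instance (n : Int) (out : Int × String) : Decidable (Spec_bin2 n out) := by unfold Spec_bin2; infer_instance

-- ===== CLAIM (what is proved, stated in full; the proofs are below) =====
def Claim_equal_bin2 : Prop := ∀ (n : Int), Dom_bin2 n → Spec_bin2 n (bin2 n)

-- ===== LEMMAS AND PROOFS =====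

-- number of trailing zero bits (proof helper)
def tzN (m : Nat) : Nat :=
  if _h : m = 0 ∨ m % 2 = 1 then 0 else tzN (m / 2) + 1
decreasing_by exact Nat.div_lt_self (by omega) (by omega)

-- least-significant-bit-first binary characters (proof helper)
def lsbChars (m : Nat) : List Char :=
  if _h : m = 0 then [] else (if m % 2 = 1 then '1' else '0') :: lsbChars (m / 2)
decreasing_by exact Nat.div_lt_self (by omega) (by omega)

theorem binChars_reverse (m : Nat) : (binChars m).reverse = lsbChars m := by
  induction m using Nat.strong_induction_on with
  | _ m ih =>
    by_cases h : m = 0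
    · simp [binChars, lsbChars, h]
    · rw [binChars, lsbChars, if_neg h, dif_neg h, List.reverse_append,
        ih (m / 2) (Nat.div_lt_self (by omega) (by omega))]
      simp

theorem band_one_natCast (m : Nat) : PySem.Int.band (m : Int) 1 = ((m % 2 : Nat) : Int) := by
  simp [PySem.Int.band, Nat.and_one_is_mod]

theorem lsbChars_pos (m : Nat) (h : m ≠ 0) :
    lsbChars m = (if m % 2 = 1 then '1' else '0') :: lsbChars (m / 2) := by
  rw [lsbChars, dif_neg h]

theorem loopA_eq (m : Nat) : ∀ (b : List Char) (fb k : Int), 0 ≤ k →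
    bin2Loop (m : Int) b fb k =
      ((if m = 0 ∨ fb ≠ -1 then fb else k + (tzN m : Int)), b ++ lsbChars m) := by
  induction m using Nat.strong_induction_on with
  | _ m ih =>
    intro b fb k hk
    by_cases h : m = 0
    · subst h
      rw [bin2Loop]
      simp [lsbChars]
    · have hpos : (0:Int) < (m:Int) := by exact_mod_cast Nat.pos_of_ne_zero h
      have hfd : PySem.Int.floordiv (m : Int) 2 = ((m / 2 : Nat) : Int) := by
        exact_mod_cast PySem.Int.floordiv_natCast m 2
      have ih2 := ih (m / 2) (Nat.div_lt_self (by omega) (by omega))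
      rw [bin2Loop, dif_pos hpos, band_one_natCast m, hfd]
      by_cases hodd : m % 2 = 1
      · rw [if_pos (by simp [hodd]), ih2 _ _ _ (by omega)]
        rw [lsbChars_pos m h, if_pos hodd]
        simp only [Prod.mk.injEq]
        refine ⟨?_, by simp⟩
        rw [show tzN m = 0 from by rw [tzN, dif_pos (Or.inr hodd)]]
        by_cases hfb : fb = -1
        · subst hfb
          rw [if_pos rfl, if_pos (Or.inr (by omega)), if_neg (by simp [h])]
          omega
        · rw [if_neg hfb, if_pos (Or.inr hfb), if_pos (Or.inr hfb)]
      · rw [if_neg (by simp [Nat.mod_two_ne_one.mp hodd]), ih2 _ _ _ (by omega)]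
        rw [lsbChars_pos m h, if_neg hodd]
        simp only [Prod.mk.injEq]
        refine ⟨?_, by simp⟩
        rw [show tzN m = tzN (m / 2) + 1 from by rw [tzN, dif_neg (by omega)]]
        by_cases hfb : fb = -1
        · subst hfb
          rw [if_neg (by omega), if_neg (by simp [h])]
          push_cast
          omega
        · rw [if_pos (Or.inr hfb), if_pos (Or.inr hfb)]

theorem sub_land_pred (m : Nat) (hm : 0 < m) : m - (m &&& (m - 1)) = 2 ^ tzN m := by
  induction m using Nat.strong_induction_on with
  | _ m ih =>
    by_cases hodd : m % 2 = 1
    · obtain ⟨q, rfl⟩ : ∃ q, m = 2 * q + 1 := ⟨m / 2, by omega⟩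
      have h2 := Nat.land_bit true q false q
      simp [Nat.bit] at h2
      rw [show 2 * q + 1 - 1 = 2 * q from by omega, h2,
        tzN, dif_pos (Or.inr (by omega))]
      omega
    · obtain ⟨q, rfl⟩ : ∃ q, m = 2 * q := ⟨m / 2, by omega⟩
      have hq : 0 < q := by omega
      have h2 := Nat.land_bit false q true (q - 1)
      simp [Nat.bit] at h2
      have hle : q &&& (q - 1) ≤ q := Nat.and_le_left
      have ihh := ih q (by omega) hq
      rw [show 2 * q - 1 = 2 * (q - 1) + 1 from by omega, h2,
        tzN, dif_neg (by omega), show 2 * q / 2 = q from by omega, pow_succ]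
      omega

theorem bitLength_two_pow (t : Nat) : PySem.Int.bitLength ((2 ^ t : Nat) : Int) = t + 1 := by
  induction t with
  | zero =>
    have := PySem.Int.bitLength_natCast (m := 1) (by omega)
    simpa [PySem.Int.bitLength_zero] using this
  | succ t ih =>
    have := PySem.Int.bitLength_natCast (m := 2 ^ (t + 1)) (by positivity)
    rw [this, show 2 ^ (t + 1) / 2 = 2 ^ t by omega, ih]

theorem band_neg_self (n : Int) (hn : 0 < n) :
    PySem.Int.band n (-n) = ((2 ^ tzN n.toNat : Nat) : Int) := by
  rw [PySem.Int.band, if_pos (by omega), if_neg (by omega)]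
  rw [show (-(-n) - 1).toNat = n.toNat - 1 by omega]
  exact_mod_cast sub_land_pred n.toNat (by omega)

-- ===== VERDICT (by name: the statement is the Claim_ definition above) =====
theorem bin2_spec : Claim_equal_bin2 := by
  intro n _
  unfold Spec_bin2 bin2 bin2_alt
  by_cases hn : 0 < n
  · rw [if_neg (by omega)]
    have hcast : (n.toNat : Int) = n := Int.toNat_of_nonneg (by omega)
    have hm : n.toNat ≠ 0 := by omega
    have hloop := loopA_eq n.toNat [] (-1) 0 le_rfl
    rw [hcast] at hloop
    rw [hloop, band_neg_self n hn, bitLength_two_pow]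
    simp [binChars_reverse, hm]
  · rw [if_pos (by omega), bin2Loop, dif_neg hn]
    rfl
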